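-- pv_equiv track=rewrite | github.com/Ukasz11233/nat2wf | post_processing.py | has_vertex_with_multiple_edges
-- ===== SOURCE A (Python) =====
-- from collections import defaultdict, deque
--
-- def has_vertex_with_multiple_edges(edges):
--     graph = defaultdict(list)
--
--     # Dodawanie krawędzi do grafu
--     for edge in edges:
--         u, v = edge
--         graph[u].append(v)
--
--     # Sprawdzenie każdego wierzchołka
--     for vertex in graph:
--         if len(graph[vertex]) >= 2:
--             return True
--
--     return False
-- ===== SOURCE B (Python) =====
-- def has_vertex_with_multiple_edges(edges):
--     seen = set()
--     for edge in edges: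
--         u, v = edge
--         if u in seen:
--             return True
--         seen.add(u)
--     return False
-- ===== Notes on version B (the rewrite author's own statement) =====
-- stated objective: simpler
-- what changed: Replaces A's build-full-adjacency-dict-then-rescan (two loops, all out-lists materialised) with a single early-returning pass that keeps only a set of source vertices already seen and returns True at the first repeated source.
import Mathlib
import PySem

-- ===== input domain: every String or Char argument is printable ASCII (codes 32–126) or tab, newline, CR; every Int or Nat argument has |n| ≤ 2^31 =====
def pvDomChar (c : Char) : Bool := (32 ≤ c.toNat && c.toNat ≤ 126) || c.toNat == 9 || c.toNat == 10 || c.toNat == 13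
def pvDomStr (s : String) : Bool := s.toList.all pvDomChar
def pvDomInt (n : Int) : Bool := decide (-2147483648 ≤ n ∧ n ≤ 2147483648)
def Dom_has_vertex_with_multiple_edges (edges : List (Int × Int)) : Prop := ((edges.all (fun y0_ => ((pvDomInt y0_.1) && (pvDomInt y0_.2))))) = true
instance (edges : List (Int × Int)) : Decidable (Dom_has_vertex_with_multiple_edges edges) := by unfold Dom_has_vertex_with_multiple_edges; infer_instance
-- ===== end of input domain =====

-- B replaces A's build-adjacency-dict-then-rescan with one early-returning pass over a set of seen sources (simpler; same asymptotic cost).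

-- ===== PORT A =====
-- graph = defaultdict(list); for (u,v) in edges: graph[u].append(v)  — defaultdict access is Dict.modify with default []
-- then: for vertex in graph: if len(graph[vertex]) >= 2: return True; return False
def has_vertex_with_multiple_edges (edges : List (Int × Int)) : Bool :=
  let graph : PySem.Dict Int (List Int) :=
    edges.foldl (fun d p => d.modify p.1 [] (· ++ [p.2])) PySem.Dict.empty
  graph.keys.any (fun vertex => decide (2 ≤ (graph.getD vertex []).length))

-- ===== PORT B =====
def has_vertex_with_multiple_edges_alt_go (seen : PySem.Set Int) : List (Int × Int) → Bool
  | [] => false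
  | edge :: rest =>
    let u := edge.1
    if PySem.Set.contains seen u then true
    else has_vertex_with_multiple_edges_alt_go (PySem.Set.add seen u) rest

def has_vertex_with_multiple_edges_alt (edges : List (Int × Int)) : Bool :=
  has_vertex_with_multiple_edges_alt_go PySem.Set.empty edges

-- ===== PRECONDITION & SPEC =====
def Spec_has_vertex_with_multiple_edges (edges : List (Int × Int)) (out : Bool) : Prop := out = has_vertex_with_multiple_edges_alt edges
instance (edges : List (Int × Int)) (out : Bool) : Decidable (Spec_has_vertex_with_multiple_edges edges out) := by unfold Spec_has_vertex_with_multiple_edges; infer_instance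

-- ===== CLAIM (what is proved, stated in full; the proofs are below) =====
def Claim_equal_has_vertex_with_multiple_edges : Prop := ∀ (edges : List (Int × Int)), Dom_has_vertex_with_multiple_edges edges → Spec_has_vertex_with_multiple_edges edges (has_vertex_with_multiple_edges edges)

-- ===== LEMMAS AND PROOFS =====

-- A returns true iff some source vertex occurs at least twice among the edges' first components.
theorem portA_true_iff (edges : List (Int × Int)) :
    has_vertex_with_multiple_edges edges = true ↔
      ∃ u, 2 ≤ (edges.map Prod.fst).count u := by
  unfold has_vertex_with_multiple_edges
  simp only [List.any_eq_true, decide_eq_true_eq]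
  constructor
  · rintro ⟨u, _, hlen⟩
    refine ⟨u, ?_⟩
    rw [PySem.Dict.getD_foldl_modify_append] at hlen
    simp only [PySem.Dict.getD_empty, List.nil_append, List.length_map] at hlen
    simpa [List.count_eq_countP, List.countP_map, List.countP_eq_length_filter, List.filter_map, List.length_map, Function.comp_def, eq_comm] using hlen
  · rintro ⟨u, hcnt⟩
    refine ⟨u, ?_, ?_⟩
    · rw [PySem.Dict.keys_foldl_modify_key]
      simp only [PySem.Dict.keys_empty]
      rw [PySem.Set.update_nil_left]
      rw [PySem.Set.mem_ofList]
      have : u ∈ edges.map Prod.fst := List.count_pos_iff.mp (by omega)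
      simpa using this
    · rw [PySem.Dict.getD_foldl_modify_append]
      simp only [PySem.Dict.getD_empty, List.nil_append, List.length_map]
      simpa [List.count_eq_countP, List.countP_map, List.countP_eq_length_filter, List.filter_map, List.length_map, Function.comp_def, eq_comm] using hcnt

-- loop invariant for B's pass
theorem portB_go_true_iff (l : List (Int × Int)) :
    ∀ (seen : PySem.Set Int),
    has_vertex_with_multiple_edges_alt_go seen l = true ↔
      (∃ p ∈ l, p.1 ∈ seen) ∨ ¬ (l.map Prod.fst).Nodup := by
  induction l with
  | nil => intro seen; simp [has_vertex_with_multiple_edges_alt_go]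
  | cons e rest ih =>
    intro seen
    by_cases hu : e.1 ∈ seen
    · have hc : PySem.Set.contains seen e.1 = true := by
        simp [PySem.Set.contains_eq_listContains]; exact hu
      simp only [has_vertex_with_multiple_edges_alt_go, hc]
      rw [if_pos trivial]
      exact iff_of_true rfl (Or.inl ⟨e, by simp, hu⟩)
    · have hc : PySem.Set.contains seen e.1 = false := by
        simp [PySem.Set.contains_eq_listContains]
        exact hu
      simp only [has_vertex_with_multiple_edges_alt_go, hc]
      rw [if_neg (by simp), ih]
      simp only [PySem.Set.mem_add, List.map_cons, List.nodup_cons]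
      constructor
      · rintro (⟨p, hp, hin | hpe⟩ | hnd)
        · exact Or.inl ⟨p, List.mem_cons_of_mem _ hp, hin⟩
        · right; intro ⟨h1, _⟩; exact h1 (hpe ▸ List.mem_map_of_mem hp)
        · right; intro ⟨_, h2⟩; exact hnd h2
      · rintro (⟨p, hp, hin⟩ | hnd)
        · rcases List.mem_cons.mp hp with rfl | hp'
          · exact absurd hin hu
          · exact Or.inl ⟨p, hp', Or.inl hin⟩
        · by_cases hmem : e.1 ∈ rest.map Prod.fst
          · rcases List.mem_map.mp hmem with ⟨p, hp, hpe⟩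
            exact Or.inl ⟨p, hp, Or.inr hpe⟩
          · right; intro hnd'; exact hnd ⟨hmem, hnd'⟩

-- ===== VERDICT (by name: the statement is the Claim_ definition above) =====
theorem has_vertex_with_multiple_edges_spec : Claim_equal_has_vertex_with_multiple_edges := by
  intro edges _
  unfold Spec_has_vertex_with_multiple_edges
  rw [Bool.eq_iff_iff, portA_true_iff]
  unfold has_vertex_with_multiple_edges_alt
  rw [portB_go_true_iff]
  simp only [PySem.Set.empty, List.not_mem_nil, and_false, exists_false, false_or]
  rw [List.nodup_iff_count_le_one]
  push Not
  constructor
  · rintro ⟨u, hu⟩; exact ⟨u, by omega⟩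
  · rintro ⟨u, hu⟩; exact ⟨u, by omega⟩
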